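-- pv_equiv track=rewrite | github.com/sellio5263/ProjectEuler | Solutions/Project_Euler_Problem_049.py | get_permutation_groups
-- ===== SOURCE A (Python) =====
-- def get_permutation_groups(primes):
--     # Get a list of all of the groups of primes that are permutations of another prime
--     permutation_groups = []
--     # Start with a prime number p1, and check every other prime p2 to see if it's a permuutation of p1
--     for p in primes:
--         perms = []
--         for p2 in primes:
--             # Add all permuted prime versions of p to perms, then keep track of that set
--             if is_permutation(p, p2):
--                 perms.append(p2)
--         permutation_groups.append(perms)
--     return permutation_groups
--
-- def is_permutation(n1, n2):
--     return sorted(str(n1)) == sorted(str(n2))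
-- ===== SOURCE B (Python) =====
-- def get_permutation_groups(primes):
--     # Bucket primes by sorted-digit signature once, then look each prime's group up.
--     buckets = {}
--     for p in primes:
--         buckets.setdefault(tuple(sorted(str(p))), []).append(p)
--     return [buckets[tuple(sorted(str(p)))] for p in primes]
-- ===== Notes on version B (the rewrite author's own statement) =====
-- stated objective: faster
-- what changed: Replaces the quadratic all-pairs permutation scan with a single pass that buckets primes by their sorted-digit signature in a dict and then looks each prime's group up.
import Mathlib
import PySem

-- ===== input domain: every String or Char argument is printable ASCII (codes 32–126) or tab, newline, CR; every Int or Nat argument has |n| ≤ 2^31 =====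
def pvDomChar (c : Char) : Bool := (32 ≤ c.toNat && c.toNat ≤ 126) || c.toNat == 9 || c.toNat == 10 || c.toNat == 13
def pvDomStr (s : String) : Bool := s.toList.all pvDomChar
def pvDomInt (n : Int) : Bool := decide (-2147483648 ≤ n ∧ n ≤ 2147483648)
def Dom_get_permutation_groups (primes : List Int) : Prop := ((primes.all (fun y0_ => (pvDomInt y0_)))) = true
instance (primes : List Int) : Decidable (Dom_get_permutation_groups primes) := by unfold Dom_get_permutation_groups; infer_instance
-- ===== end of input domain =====

-- B buckets primes by sorted-digit signature in one dict pass instead of A's all-pairs scan (faster: asymptotic).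


-- ===== PORT A =====
-- is_permutation(n1, n2) = sorted(str(n1)) == sorted(str(n2))
def is_permutation (n1 n2 : Int) : Bool :=
  PySem.List.sorted (PySem.Int.toStr n1).toList (fun c => c) false
    == PySem.List.sorted (PySem.Int.toStr n2).toList (fun c => c) false

def get_permutation_groups (primes : List Int) : List (List Int) :=
  primes.foldl
    (fun permutation_groups p =>
      permutation_groups ++
        [primes.foldl
          (fun perms p2 => if is_permutation p p2 then perms ++ [p2] else perms) []])
    []

-- ===== PORT B =====
-- tuple(sorted(str(p))) — the bucket key
def pvSig (p : Int) : List Char :=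
  PySem.List.sorted (PySem.Int.toStr p).toList (fun c => c) false

def get_permutation_groups_alt (primes : List Int) : List (List Int) :=
  let buckets :=
    primes.foldl (fun d p => d.modify (pvSig p) [] (· ++ [p])) PySem.Dict.empty
  primes.map (fun p => buckets.getD (pvSig p) [])

-- ===== PRECONDITION & SPEC =====
def Spec_get_permutation_groups (primes : List Int) (out : List (List Int)) : Prop := out = get_permutation_groups_alt primes
instance (primes : List Int) (out : List (List Int)) : Decidable (Spec_get_permutation_groups primes out) := by unfold Spec_get_permutation_groups; infer_instance

-- ===== CLAIM (what is proved, stated in full; the proofs are below) =====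
def Claim_equal_get_permutation_groups : Prop := ∀ (primes : List Int), Dom_get_permutation_groups primes → Spec_get_permutation_groups primes (get_permutation_groups primes)

-- ===== LEMMAS AND PROOFS =====

-- projecting the (signature, prime) pairs back to primes
theorem map_filter_pair (l : List Int) (p : Int) :
    List.map ((fun x => x.2) ∘ fun q => (pvSig q, q))
        (List.filter ((fun x => x.1 == pvSig p) ∘ fun q => (pvSig q, q)) l)
      = List.filter (fun q => pvSig q == pvSig p) l := by
  induction l with
  | nil => rfl
  | cons q t ih =>
    simp only [List.filter_cons, Function.comp]
    by_cases hq : (pvSig q == pvSig p) = true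
    · simp [hq, ih]
    · simp [hq, ih]

-- B's dict lookup at pvSig p is exactly the primes whose signature matches.
theorem alt_bucket_eq_filter (primes : List Int) (p : Int) :
    (primes.foldl (fun d q => d.modify (pvSig q) [] (· ++ [q])) PySem.Dict.empty).getD (pvSig p) []
      = primes.filter (fun q => pvSig q == pvSig p) := by
  have h : primes.foldl (fun d q => d.modify (pvSig q) [] (· ++ [q])) PySem.Dict.empty
      = (primes.map (fun q => (pvSig q, q))).foldl
          (fun d x => d.modify x.1 [] (· ++ [x.2])) PySem.Dict.empty := by
    rw [List.foldl_map]
  rw [h, PySem.Dict.getD_foldl_modify_append, PySem.Dict.getD_empty, List.filter_map,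
    List.map_map]
  simp only [List.nil_append]
  exact map_filter_pair primes p

-- ===== VERDICT (by name: the statement is the Claim_ definition above) =====
theorem get_permutation_groups_spec : Claim_equal_get_permutation_groups := by
  intro primes _
  unfold Spec_get_permutation_groups get_permutation_groups get_permutation_groups_alt
  rw [PySem.List.foldl_append_singleton_eq_map]
  simp only [List.nil_append]
  refine List.map_congr_left ?_
  intro p _
  rw [PySem.List.foldl_append_if_eq_filter, alt_bucket_eq_filter]
  simp only [List.nil_append]
  refine List.filter_congr ?_
  intro q _
  simp [is_permutation, pvSig, eq_comm]
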